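-- pv_equiv track=rewrite | github.com/baehyunsol/h_math | eval/utils.py | pack_parentheses
-- ===== SOURCE A (Python) =====
-- def is_name(token):
--
--     if token.isalnum() and not token[0].isnumeric():
--         return True
--
--     for t in token:
--
--         if not(t.isalnum()) and t != '_':
--             return False
--
--     return True
--
-- def pack_parentheses(tokens):
--
--     i = 0
--
--     while i < len(tokens):
--
--         if tokens[i] == '(':
--
--             if i > 0 and (is_name(tokens[i - 1]) or tokens[i - 1] == ')' or tokens[i - 1] == ':' or tokens[i - 1] == ']'):
--                 i += 1
--                 continue
--
--             else:
--                 tokens = tokens[:i] + ['__bi_identity', '(', 'output', '='] + tokens[i + 1:]  # identity function -> will be removed later but it helps the parser parsing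
--
--         i += 1
--
--     return tokens
-- ===== SOURCE B (Python) =====
-- def is_name(token):
--     if token.isalnum() and not token[0].isnumeric():
--         return True
--     return all(t.isalnum() or t == '_' for t in token)
--
-- def pack_parentheses(tokens):
--     # one pass: the token to the left of an unprocessed '(' is always the last one appended
--     out = []
--     for tok in tokens:
--         if tok == '(' and not (out and (is_name(out[-1]) or out[-1] in (')', ':', ']'))):
--             out += ['__bi_identity', '(', 'output', '=']
--         else:
--             out.append(tok)
--     return out
-- ===== Notes on version B (the rewrite author's own statement) =====
-- stated objective: simpler
-- what changed: Replaces A's index-driven while loop that rebuilds the whole list by slicing at every wrap (and then re-walks the inserted tokens) with a single left-to-right pass that appends to an output list and tests the last appended token.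
import Mathlib
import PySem

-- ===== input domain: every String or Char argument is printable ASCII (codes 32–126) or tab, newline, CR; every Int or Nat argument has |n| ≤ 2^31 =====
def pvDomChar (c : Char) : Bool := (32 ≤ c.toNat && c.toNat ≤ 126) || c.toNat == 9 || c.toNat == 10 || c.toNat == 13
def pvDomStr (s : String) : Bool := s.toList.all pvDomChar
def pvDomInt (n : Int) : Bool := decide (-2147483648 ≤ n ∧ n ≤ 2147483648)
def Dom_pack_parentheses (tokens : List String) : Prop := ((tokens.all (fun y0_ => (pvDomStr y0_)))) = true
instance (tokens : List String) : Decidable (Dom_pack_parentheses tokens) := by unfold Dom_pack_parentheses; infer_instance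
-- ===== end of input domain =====

-- B replaces A's index-driven while-loop with list re-slicing by a single left-to-right
-- pass that appends to an output list and consults its last appended token (objective: simpler).

-- ===== PORT A =====
-- is_name's for-loop, step for step
def is_name_loopA : List Char → Bool
  | [] => true
  | t :: ts => if !(PySem.Chars.isalnum t) && !(t == '_') then false else is_name_loopA ts

-- token[0].isnumeric() ported as isdigit on the head: exact on the ASCII domain;
-- token[0] is only reached when token.isalnum() holds, so token is nonempty there.
def is_nameA (token : String) : Bool :=
  if PySem.Str.strIsalnum token && !(PySem.Chars.isdigit (token.toList.headD ' ')) then true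
  else is_name_loopA token.toList

-- the while-loop; fuel only makes the recursion structural (4*len+1 steps always suffice:
-- each original token costs one step, a wrapped '(' costs four). tokens[:i]/tokens[i+1:]
-- with 0 ≤ i are exactly List.take/List.drop.
def packLoopA : Nat → List String → Nat → List String
  | 0, tokens, _ => tokens
  | fuel + 1, tokens, i =>
    if i < tokens.length then
      if tokens.getD i "" == "(" then
        if decide (0 < i) &&
            (is_nameA (tokens.getD (i - 1) "") || tokens.getD (i - 1) "" == ")" ||
              tokens.getD (i - 1) "" == ":" || tokens.getD (i - 1) "" == "]") then
          packLoopA fuel tokens (i + 1)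
        else
          packLoopA fuel
            (tokens.take i ++ ["__bi_identity", "(", "output", "="] ++ tokens.drop (i + 1))
            (i + 1)
      else packLoopA fuel tokens (i + 1)
    else tokens

def pack_parentheses (tokens : List String) : List String :=
  packLoopA (4 * tokens.length + 1) tokens 0

-- ===== PORT B =====
def is_nameB (token : String) : Bool :=
  if PySem.Str.strIsalnum token && !(PySem.Chars.isdigit (token.toList.headD ' ')) then true
  else token.toList.all (fun t => PySem.Chars.isalnum t || t == '_')

def prevOkB (p : String) : Bool :=
  is_nameB p || p == ")" || p == ":" || p == "]"

def stepB (out : List String) (tok : String) : List String :=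
  if tok == "(" && !(!out.isEmpty && prevOkB (out.getLastD "")) then
    out ++ ["__bi_identity", "(", "output", "="]
  else out ++ [tok]

def pack_parentheses_alt (tokens : List String) : List String :=
  tokens.foldl stepB []

-- ===== PRECONDITION & SPEC =====
def Spec_pack_parentheses (tokens : List String) (out : List String) : Prop := out = pack_parentheses_alt tokens
instance (tokens : List String) (out : List String) : Decidable (Spec_pack_parentheses tokens out) := by unfold Spec_pack_parentheses; infer_instance

-- ===== CLAIM (what is proved, stated in full; the proofs are below) =====
def Claim_equal_pack_parentheses : Prop := ∀ (tokens : List String), Dom_pack_parentheses tokens → Spec_pack_parentheses tokens (pack_parentheses tokens)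

-- ===== LEMMAS AND PROOFS =====

lemma is_name_loopA_eq_all (l : List Char) :
    is_name_loopA l = l.all (fun t => PySem.Chars.isalnum t || t == '_') := by
  induction l with
  | nil => rfl
  | cons t ts ih =>
    simp only [is_name_loopA, List.all_cons, ih]
    cases h : PySem.Chars.isalnum t <;> cases h2 : (t == '_') <;> simp

lemma is_nameA_eq (token : String) : is_nameA token = is_nameB token := by
  simp [is_nameA, is_nameB, is_name_loopA_eq_all]

lemma getD_app_mid (done rs : List String) (t : String) :
    (done ++ t :: rs).getD done.length "" = t := by
  simp [List.getD]

lemma getD_app_prev (done rest : List String) (h : done ≠ []) :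
    (done ++ rest).getD (done.length - 1) "" = done.getLastD "" := by
  have hl : 0 < done.length := List.length_pos_iff.mpr h
  rw [List.getD_eq_getElem?_getD, List.getElem?_append_left (by omega),
    List.getLastD_eq_getLast?, List.getLast?_eq_getElem?]

lemma prev_cond_eq (done rest : List String) :
    (decide (0 < done.length) &&
        (is_nameA ((done ++ rest).getD (done.length - 1) "") ||
          (done ++ rest).getD (done.length - 1) "" == ")" ||
          (done ++ rest).getD (done.length - 1) "" == ":" ||
          (done ++ rest).getD (done.length - 1) "" == "]")) =
      (!done.isEmpty && prevOkB (done.getLastD "")) := by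
  cases done with
  | nil => simp
  | cons d ds =>
    have hne : (d :: ds : List String) ≠ [] := by simp
    rw [getD_app_prev _ _ hne]
    simp [prevOkB, is_nameA_eq, Bool.or_assoc]

lemma packLoopA_eq_foldl (rest : List String) :
    ∀ (done : List String) (fuel : Nat), 4 * rest.length + 1 ≤ fuel →
      packLoopA fuel (done ++ rest) done.length = rest.foldl stepB done := by
  induction rest with
  | nil =>
    intro done fuel h
    match fuel, h with
    | fuel + 1, _ => simp [packLoopA]
  | cons t rs ih =>
    intro done fuel h
    match fuel, h with
    | fuel + 1, h =>
      have hf : 4 * rs.length + 4 ≤ fuel := by simp [List.length_cons] at h; omega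
      have hlt : done.length < (done ++ t :: rs).length := by simp
      rw [packLoopA, if_pos hlt, getD_app_mid]
      by_cases ht : t = "("
      · subst ht
        rw [prev_cond_eq done ("(" :: rs)]
        cases hc : (!done.isEmpty && prevOkB (done.getLastD "")) with
        | true =>
          -- previous token accepts the '(' : both sides just keep it
          simp only [beq_self_eq_true, if_true]
          have hs : stepB done "(" = done ++ ["("] := by
            unfold stepB; rw [hc]; simp
          have : done ++ "(" :: rs = (done ++ ["("]) ++ rs := by simp
          rw [this]
          have hlen : done.length + 1 = (done ++ ["("]).length := by simp
          rw [hlen, ih _ fuel (by omega)]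
          rw [List.foldl_cons, hs]
        | false =>
          -- wrap: A splices in the four tokens and then walks over them; B appends them
          simp only [beq_self_eq_true, if_true, Bool.false_eq_true, if_false]
          have htake : (done ++ "(" :: rs).take done.length = done := by
            simp
          have hdrop : (done ++ "(" :: rs).drop (done.length + 1) = rs := by
            rw [show done.length + 1 = (done ++ ["("]).length by simp,
              show done ++ "(" :: rs = (done ++ ["("]) ++ rs by simp]
            exact List.drop_left
          rw [htake, hdrop]
          set W : List String := ["__bi_identity", "(", "output", "="] with hW
          have harr : done ++ W ++ rs = done ++ W ++ rs := rfl
          -- three skip steps over the inserted '(' , 'output', '='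
          match fuel, hf with
          | fuel + 3, hf =>
            have e1 : done ++ W ++ rs =
                (done ++ ["__bi_identity"]) ++ "(" :: ("output" :: "=" :: rs) := by simp [hW]
            have l1 : done.length + 1 = (done ++ ["__bi_identity"]).length := by simp
            have hlt1 : done.length + 1 < (done ++ W ++ rs).length := by simp [hW]
            rw [packLoopA, if_pos hlt1, e1, l1, getD_app_mid]
            rw [prev_cond_eq (done ++ ["__bi_identity"]) _]
            have hgl : (done ++ ["__bi_identity"]).getLastD "" = "__bi_identity" := by
              simp
            have hp1 : (!(done ++ ["__bi_identity"]).isEmpty &&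
                prevOkB ((done ++ ["__bi_identity"]).getLastD "")) = true := by
              rw [hgl]; simp; decide
            rw [hp1]
            simp only [beq_self_eq_true, if_true]
            have e2 : (done ++ ["__bi_identity"]) ++ "(" :: ("output" :: "=" :: rs) =
                (done ++ ["__bi_identity", "("]) ++ "output" :: ("=" :: rs) := by simp
            have l2 : (done ++ ["__bi_identity"]).length + 1 =
                (done ++ ["__bi_identity", "("]).length := by simp
            have hlt2 : (done ++ ["__bi_identity"]).length + 1 <
                ((done ++ ["__bi_identity"]) ++ "(" :: ("output" :: "=" :: rs)).length := by
              simp; omega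
            rw [packLoopA, if_pos hlt2, e2, l2, getD_app_mid]
            have : ("output" == "(") = false := by decide
            rw [this]
            simp only [Bool.false_eq_true, if_false]
            have e3 : (done ++ ["__bi_identity", "("]) ++ "output" :: ("=" :: rs) =
                (done ++ ["__bi_identity", "(", "output"]) ++ "=" :: rs := by simp
            have l3 : (done ++ ["__bi_identity", "("]).length + 1 =
                (done ++ ["__bi_identity", "(", "output"]).length := by simp
            have hlt3 : (done ++ ["__bi_identity", "("]).length + 1 <
                ((done ++ ["__bi_identity", "("]) ++ "output" :: ("=" :: rs)).length := by
              simp; omega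
            rw [packLoopA, if_pos hlt3, e3, l3, getD_app_mid]
            have : ("=" == "(") = false := by decide
            rw [this]
            simp only [Bool.false_eq_true, if_false]
            have e4 : (done ++ ["__bi_identity", "(", "output"]) ++ "=" :: rs =
                (done ++ W) ++ rs := by simp [hW]
            have l4 : (done ++ ["__bi_identity", "(", "output"]).length + 1 =
                (done ++ W).length := by simp [hW]
            have hs : stepB done "(" = done ++ W := by
              unfold stepB; rw [hc]; simp [hW]
            rw [e4, l4, ih _ fuel (by omega), List.foldl_cons, hs]
      · have htf : (t == "(") = false := by simp [ht]
        rw [htf]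
        simp only [Bool.false_eq_true, if_false]
        have : done ++ t :: rs = (done ++ [t]) ++ rs := by simp
        have hs : stepB done t = done ++ [t] := by
          unfold stepB; rw [htf]; simp
        rw [this, show done.length + 1 = (done ++ [t]).length by simp, ih _ fuel (by omega),
          List.foldl_cons, hs]

-- ===== VERDICT (by name: the statement is the Claim_ definition above) =====
theorem pack_parentheses_spec : Claim_equal_pack_parentheses := by
  intro tokens _
  show pack_parentheses tokens = pack_parentheses_alt tokens
  have := packLoopA_eq_foldl tokens [] (4 * tokens.length + 1) (by omega)
  simpa [pack_parentheses, pack_parentheses_alt] using this
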